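-- pv_equiv track=rewrite | github.com/cometadata/funding-metadata-enrichment | evals/evaluate_funding_extraction/evaluate_funding_extraction.py | filter_predictions_to_gold
-- ===== SOURCE A (Python) =====
-- from typing import Dict, Iterable, List, Tuple
--
-- def filter_predictions_to_gold(
--     predictions: Dict[str, List[str]], gold_filenames: Iterable[str]
-- ) -> Tuple[Dict[str, List[str]], int, int, int]:
--     gold_set = set(gold_filenames)
--     total_preds_in_file = sum(len(v) for v in predictions.values())
--
--     filtered: Dict[str, List[str]] = {
--         fname: stmts for fname, stmts in predictions.items() if fname in gold_set
--     }
--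
--     total_preds_used = sum(len(v) for v in filtered.values())
--     total_preds_discarded = total_preds_in_file - total_preds_used
--     return filtered, total_preds_in_file, total_preds_used, total_preds_discarded
-- ===== SOURCE B (Python) =====
-- from typing import Dict, Iterable, List, Tuple
--
--
-- def filter_predictions_to_gold(
--     predictions: Dict[str, List[str]], gold_filenames: Iterable[str]
-- ) -> Tuple[Dict[str, List[str]], int, int, int]:
--     gold = sorted(gold_filenames)
--
--     def has(x: str) -> bool:
--         lo, hi = 0, len(gold)
--         while lo < hi:
--             mid = (lo + hi) // 2
--             v = gold[mid]
--             if v < x: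
--                 lo = mid + 1
--             elif x < v:
--                 hi = mid
--             else:
--                 return True
--         return False
--
--     filtered: Dict[str, List[str]] = {}
--     total = 0
--     used = 0
--     for fname, stmts in predictions.items():
--         n = len(stmts)
--         total += n
--         if has(fname):
--             filtered[fname] = stmts
--             used += n
--     return filtered, total, used, total - used
-- ===== Notes on version B (the rewrite author's own statement) =====
-- stated objective: alternative
-- what changed: Replaces A's hash set plus three separate passes (total sum, dict comprehension, filtered sum) with a sorted list of gold filenames queried by an explicit binary search, inside a single accumulating pass that builds the filtered dict and both counts at once, deriving the discarded count by subtraction.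
import Mathlib
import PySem

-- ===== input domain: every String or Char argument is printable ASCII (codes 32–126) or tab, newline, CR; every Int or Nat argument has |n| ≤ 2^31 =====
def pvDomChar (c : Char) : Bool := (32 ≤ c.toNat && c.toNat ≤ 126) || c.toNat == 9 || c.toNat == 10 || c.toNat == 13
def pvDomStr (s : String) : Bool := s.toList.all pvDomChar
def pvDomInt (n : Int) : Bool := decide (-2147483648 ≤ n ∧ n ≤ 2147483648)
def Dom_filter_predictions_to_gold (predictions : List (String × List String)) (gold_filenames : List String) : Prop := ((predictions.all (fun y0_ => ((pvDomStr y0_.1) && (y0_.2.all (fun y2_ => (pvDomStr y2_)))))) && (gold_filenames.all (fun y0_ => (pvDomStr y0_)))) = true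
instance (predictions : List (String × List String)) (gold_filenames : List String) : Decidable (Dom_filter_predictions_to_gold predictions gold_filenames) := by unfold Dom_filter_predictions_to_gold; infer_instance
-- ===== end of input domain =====

-- B replaces A's hash set + three passes by a sorted gold list queried with a
-- binary search inside one accumulating pass; alternative algorithm, same task.
-- ===== PORT A =====
def filter_predictions_to_gold (predictions : List (String × List String)) (gold_filenames : List String) : (List (String × List String)) × Int × Int × Int :=
  let gold_set : PySem.Set String := PySem.Set.ofList gold_filenames
  let total_preds_in_file : Int := (predictions.map (fun p => (p.2.length : Int))).sum
  -- dict comprehension over predictions.items(); keys are unique (Pre_), so it keeps the matching items in order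
  let filtered : List (String × List String) := predictions.filter (fun p => PySem.Set.contains gold_set p.1)
  let total_preds_used : Int := (filtered.map (fun p => (p.2.length : Int))).sum
  let total_preds_discarded : Int := total_preds_in_file - total_preds_used
  (filtered, total_preds_in_file, total_preds_used, total_preds_discarded)

-- ===== PORT B =====
-- the while-loop of B's helper `has`, as structural recursion on hi - lo;
-- gold[mid] is ported as List.getD (exact: lo ≤ mid < hi ≤ len gold whenever it is read)
def pvHas (gold : List String) (x : String) (lo hi : Nat) : Bool :=
  if h : lo < hi then
    let mid := (lo + hi) / 2
    let v := gold.getD mid ""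
    if v < x then pvHas gold x (mid + 1) hi
    else if x < v then pvHas gold x lo mid
    else true
  else false
termination_by hi - lo
decreasing_by all_goals omega

-- the body of B's single for-loop over predictions.items()
def pvStep (gold : List String) (acc : PySem.Dict String (List String) × Int × Int) (p : String × List String) : PySem.Dict String (List String) × Int × Int :=
  let n : Int := p.2.length
  if pvHas gold p.1 0 gold.length then (acc.1.insert p.1 p.2, acc.2.1 + n, acc.2.2 + n)
  else (acc.1, acc.2.1 + n, acc.2.2)

def filter_predictions_to_gold_alt (predictions : List (String × List String)) (gold_filenames : List String) : (List (String × List String)) × Int × Int × Int :=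
  let gold : List String := PySem.List.sorted gold_filenames (fun s => s) false
  let r := predictions.foldl (pvStep gold) (PySem.Dict.empty, 0, 0)
  (r.1.items, r.2.1, r.2.2, r.2.1 - r.2.2)

-- ===== PRECONDITION & SPEC =====
-- Pre_ requires the association list representing the input dict to have unique keys
-- (the invariant of a Python dict); on duplicate keys the list is not a faithful dict.
def Pre_filter_predictions_to_gold (predictions : List (String × List String)) (_gold_filenames : List String) : Prop :=
  (predictions.map Prod.fst).Nodup
instance (predictions : List (String × List String)) (gold_filenames : List String) : Decidable (Pre_filter_predictions_to_gold predictions gold_filenames) := by unfold Pre_filter_predictions_to_gold; infer_instance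
def pvWitness_filter_predictions_to_gold : (List (String × List String)) × List String := ([("a", ["x", "y"]), ("b", ["z"])], ["a"])

def Spec_filter_predictions_to_gold (predictions : List (String × List String)) (gold_filenames : List String) (out : (List (String × List String)) × Int × Int × Int) : Prop := out = filter_predictions_to_gold_alt predictions gold_filenames
instance (predictions : List (String × List String)) (gold_filenames : List String) (out : (List (String × List String)) × Int × Int × Int) : Decidable (Spec_filter_predictions_to_gold predictions gold_filenames out) := by unfold Spec_filter_predictions_to_gold; infer_instance

-- ===== CLAIM (what is proved, stated in full; the proofs are below) =====
def Claim_equal_filter_predictions_to_gold : Prop := ∀ (predictions : List (String × List String)) (gold_filenames : List String), Dom_filter_predictions_to_gold predictions gold_filenames → Pre_filter_predictions_to_gold predictions gold_filenames → Spec_filter_predictions_to_gold predictions gold_filenames (filter_predictions_to_gold predictions gold_filenames)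

-- ===== LEMMAS AND PROOFS =====
-- binary search on a sorted list finds x in [lo, hi) iff it occurs there
lemma pvHas_interval (g : List String) (x : String) (hs : g.Pairwise (· ≤ ·)) :
    ∀ n lo hi, hi - lo ≤ n → hi ≤ g.length →
    (pvHas g x lo hi = true ↔ ∃ i, lo ≤ i ∧ i < hi ∧ ∃ h : i < g.length, g[i] = x) := by
  intro n
  induction n with
  | zero =>
    intro lo hi hn _
    rw [pvHas]
    have : ¬ lo < hi := by omega
    simp only [this, dite_false]
    constructor
    · intro h; exact absurd h (by simp)
    · rintro ⟨i, h1, h2, _⟩; omega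
  | succ m ih =>
    intro lo hi hn hhi
    rw [pvHas]
    by_cases hlt : lo < hi
    · simp only [hlt, dite_true]
      set mid := (lo + hi) / 2 with hmid
      have hmlt : mid < hi := by omega
      have hmge : lo ≤ mid := by omega
      have hmlen : mid < g.length := by omega
      have hv : g.getD mid "" = g[mid] := List.getD_eq_getElem g "" hmlen
      have hpw : ∀ i j (hi' : i < g.length) (hj' : j < g.length), i ≤ j → g[i] ≤ g[j] := by
        intro i j hi' hj' hij
        rcases Nat.lt_or_eq_of_le hij with h | h
        · exact (List.pairwise_iff_getElem.mp hs) i j hi' hj' h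
        · subst h; exact le_refl _
      by_cases h1 : g.getD mid "" < x
      · simp only [h1, if_true]
        rw [ih (mid + 1) hi (by omega) hhi]
        constructor
        · rintro ⟨i, a, b, c⟩; exact ⟨i, by omega, b, c⟩
        · rintro ⟨i, a, b, hi', hx⟩
          refine ⟨i, ?_, b, hi', hx⟩
          by_contra hc
          have : i ≤ mid := by omega
          have := hpw i mid hi' hmlen this
          rw [hx] at this
          rw [hv] at h1
          exact absurd (lt_of_le_of_lt this h1) (lt_irrefl x)
      · simp only [h1, if_false]
        by_cases h2 : x < g.getD mid ""
        · simp only [h2, if_true]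
          rw [ih lo mid (by omega) (by omega)]
          constructor
          · rintro ⟨i, a, b, c⟩; exact ⟨i, a, by omega, c⟩
          · rintro ⟨i, a, b, hi', hx⟩
            refine ⟨i, a, ?_, hi', hx⟩
            by_contra hc
            have : mid ≤ i := by omega
            have := hpw mid i hmlen hi' this
            rw [hx] at this
            rw [hv] at h2
            exact absurd (lt_of_lt_of_le h2 this) (lt_irrefl x)
        · simp only [h2, if_false]
          have hx : g[mid] = x := by
            rw [hv] at h1 h2
            exact le_antisymm (not_lt.mp h2) (not_lt.mp h1)
          simp only [true_iff]
          exact ⟨mid, hmge, hmlt, hmlen, hx⟩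
    · simp only [hlt, dite_false]
      constructor
      · intro h; exact absurd h (by simp)
      · rintro ⟨i, a, b, _⟩; omega

-- B's membership test on sorted(gold) agrees with A's set membership
lemma pvHas_eq_contains (golds : List String) (x : String) :
    pvHas (PySem.List.sorted golds (fun s => s) false) x 0
        (PySem.List.sorted golds (fun s => s) false).length
      = PySem.Set.contains (PySem.Set.ofList golds) x := by
  set g := PySem.List.sorted golds (fun s => s) false with hg
  have hs : g.Pairwise (· ≤ ·) := by
    simpa using PySem.List.sorted_pairwise golds (fun s => s)
  have hmem : x ∈ g ↔ x ∈ golds := by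
    simp [hg, PySem.List.mem_sorted]
  have h := pvHas_interval g x hs g.length 0 g.length (by omega) (le_refl _)
  by_cases hx : x ∈ golds
  · have : pvHas g x 0 g.length = true := by
      rw [h]
      obtain ⟨i, hi, hgi⟩ := List.mem_iff_getElem.mp (hmem.mpr hx)
      exact ⟨i, by omega, hi, hi, hgi⟩
    rw [this]
    exact ((PySem.Set.contains_iff _ _).mpr (by simp [PySem.Set.mem_ofList, hx])).symm
  · have : pvHas g x 0 g.length = false := by
      rw [Bool.eq_false_iff]
      intro hc
      obtain ⟨i, _, hilt, hi', hgi⟩ := h.mp hc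
      exact hx (hmem.mp (hgi ▸ List.getElem_mem hi'))
    rw [this]
    symm
    rw [Bool.eq_false_iff]
    intro hc
    exact hx (by simpa [PySem.Set.mem_ofList] using (PySem.Set.contains_iff _ _).mp hc)

-- invariant of B's single accumulating loop
lemma pvLoop_eq (gold : List String) (l : List (String × List String))
    (d : PySem.Dict String (List String)) (t u : Int)
    (hl : (l.map Prod.fst).Nodup) (hfresh : ∀ p ∈ l, d.contains p.1 = false) :
    (l.foldl (pvStep gold) (d, t, u)).1.items
        = d.items ++ l.filter (fun p => pvHas gold p.1 0 gold.length) ∧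
      (l.foldl (pvStep gold) (d, t, u)).2.1
        = t + (l.map (fun p => (p.2.length : Int))).sum ∧
      (l.foldl (pvStep gold) (d, t, u)).2.2
        = u + ((l.filter (fun p => pvHas gold p.1 0 gold.length)).map (fun p => (p.2.length : Int))).sum := by
  induction l generalizing d t u with
  | nil => simp
  | cons hd tl ih =>
    have hhd : d.contains hd.1 = false := hfresh hd (by simp)
    have hnotmem : hd.1 ∉ tl.map Prod.fst := by
      simpa using (List.nodup_cons.mp hl).1
    have hfresh' : ∀ p ∈ tl, (d.insert hd.1 hd.2).contains p.1 = false := by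
      intro p hp
      rw [PySem.Dict.contains_insert]
      have h1 : d.contains p.1 = false := hfresh p (by simp [hp])
      have h2 : p.1 ≠ hd.1 := by
        intro he; exact hnotmem (he ▸ List.mem_map_of_mem hp)
      simp [h1, h2]
    have htl := (List.nodup_cons.mp hl).2
    by_cases hc : pvHas gold hd.1 0 gold.length
    · have := ih (d.insert hd.1 hd.2) (t + hd.2.length) (u + hd.2.length) htl hfresh'
      simp only [List.foldl_cons, pvStep, hc, if_true]
      refine ⟨?_, ?_, ?_⟩
      · rw [this.1, PySem.Dict.items_insert_of_not_contains d hd.2 hhd]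
        simp [hc]
      · rw [this.2.1]; simp [add_assoc]
      · rw [this.2.2]; simp [hc, add_assoc]
    · have hcb : pvHas gold hd.1 0 gold.length = false := by simpa using hc
      have := ih d (t + hd.2.length) u htl (fun p hp => hfresh p (by simp [hp]))
      simp only [List.foldl_cons, pvStep, hcb, Bool.false_eq_true, if_false]
      refine ⟨?_, ?_, ?_⟩
      · rw [this.1]; simp [hcb]
      · rw [this.2.1]; simp [add_assoc]
      · rw [this.2.2]; simp [hcb]

-- ===== VERDICT (by name: the statement is the Claim_ definition above) =====
theorem filter_predictions_to_gold_spec : Claim_equal_filter_predictions_to_gold := by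
  intro predictions gold_filenames _ hpre
  have h := pvLoop_eq (PySem.List.sorted gold_filenames (fun s => s) false) predictions
    PySem.Dict.empty 0 0 hpre (fun p _ => by simp)
  unfold Spec_filter_predictions_to_gold filter_predictions_to_gold filter_predictions_to_gold_alt
  obtain ⟨h1, h2, h3⟩ := h
  have hfeq : predictions.filter (fun p => pvHas (PySem.List.sorted gold_filenames (fun s => s) false) p.1 0 (PySem.List.sorted gold_filenames (fun s => s) false).length)
      = predictions.filter (fun p => PySem.Set.contains (PySem.Set.ofList gold_filenames) p.1) := by
    apply List.filter_congr
    intro p _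
    exact pvHas_eq_contains gold_filenames p.1
  simp only []
  rw [h1, h2, h3, hfeq]
  simp [PySem.Dict.empty]
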